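-- pv_equiv track=rewrite | github.com/gabriellcsilva/gaprocessmining | test_trace_maker.py | positional_dict
-- ===== SOURCE A (Python) =====
-- def positional_dict(logs):
--     pos_dict = {}
--     for key,val in logs.items():
--         for i in val:
--             if i not in pos_dict.keys():
--                 pos_dict[i] = {'before':[], 'after':[]}
--             i_index = val.index(i)
--             pos_dict[i]['before'].extend([boo for boo in val[:i_index] if boo not in pos_dict[i]['before']])
--             pos_dict[i]['after'].extend([bar for bar in val[i_index+1:] if bar not in pos_dict[i]['after']])
--     return pos_dict
-- ===== SOURCE B (Python) =====
-- def positional_dict(logs):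
--     traces = list(logs.values())
--     # Stage 1: global key order = order of first appearance across the whole log.
--     order = []
--     for val in traces:
--         for x in val:
--             if x not in order:
--                 order.append(x)
--     # Stage 2: key-major — for each key independently, fold that key's
--     # before/after contributions over the traces (the filter is evaluated
--     # against the list as it stood before the extend, as in the original).
--     result = {}
--     for key in order:
--         before, after = [], []
--         for val in traces:
--             if key in val:
--                 j = val.index(key)
--                 before += [x for x in val[:j] if x not in before]
--                 after += [x for x in val[j + 1:] if x not in after]
--         result[key] = {'before': before, 'after': after}
--     return result
-- ===== Notes on version B (the rewrite author's own statement) =====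
-- stated objective: alternative
-- what changed: B transposes the computation: a first pass computes the global key order (first appearance across all traces), then for each key independently it folds that key's before/after contributions over the traces into fresh lists, instead of A's single trace-major sweep that mutates a shared dict at every occurrence of every element.
import Mathlib
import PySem

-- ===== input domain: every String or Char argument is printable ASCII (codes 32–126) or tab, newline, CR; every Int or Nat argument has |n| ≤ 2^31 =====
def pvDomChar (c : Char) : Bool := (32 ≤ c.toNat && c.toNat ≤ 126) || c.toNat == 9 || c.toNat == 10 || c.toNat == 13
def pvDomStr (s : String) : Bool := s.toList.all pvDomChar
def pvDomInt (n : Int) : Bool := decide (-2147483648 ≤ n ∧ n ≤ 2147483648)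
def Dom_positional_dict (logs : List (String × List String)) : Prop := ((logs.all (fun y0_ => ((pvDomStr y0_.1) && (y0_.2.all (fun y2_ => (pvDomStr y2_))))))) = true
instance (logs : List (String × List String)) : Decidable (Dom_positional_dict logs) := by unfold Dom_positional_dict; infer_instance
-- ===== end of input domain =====

-- B transposes A's trace-major sweep over a shared dict into two stages: a first pass fixes the
-- global key order (first appearance), then each key's before/after lists are folded over the
-- traces independently; return values proved equal (neither program mutates its argument).

-- ===== PORT A =====
-- The inner fixed-key dict {'before': …, 'after': …} is ported as a pair (before, after);
-- it is rendered back to its items [("before", b), ("after", a)] at the return.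
def pdStepA (val : List String) (pos : PySem.Dict String (List String × List String)) (i : String) :
    PySem.Dict String (List String × List String) :=
  let pos := if pos.contains i then pos else pos.insert i ([], [])
  match PySem.List.index? val i with
  | none => pos  -- unreachable: i is an element of val, so val.index(i) never raises
  | some idx =>
    let e := pos.getD i ([], [])
    let b' := e.1 ++ (PySem.List.slice val none (some (idx : Int))).filter (fun x => !(e.1.contains x))
    let a' := e.2 ++ (PySem.List.slice val (some ((idx : Int) + 1)) none).filter (fun x => !(e.2.contains x))
    pos.insert i (b', a')

def positional_dict (logs : List (String × List String)) : List (String × List (String × List String)) :=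
  let pos := logs.foldl (fun pos kv => kv.2.foldl (pdStepA kv.2) pos) PySem.Dict.empty
  pos.items.map (fun kd => (kd.1, [("before", kd.2.1), ("after", kd.2.2)]))

-- ===== PORT B =====
-- Stage 1 inner step: append x to the order list if not yet present.
def ordStep (ord : List String) (x : String) : List String :=
  if ord.contains x then ord else ord ++ [x]

-- Stage 2 inner step: one trace's contribution to key's (before, after) pair.
def stepK (key : String) (ba : List String × List String) (val : List String) :
    List String × List String :=
  if val.contains key then
    match PySem.List.index? val key with
    | none => ba  -- unreachable: key ∈ val, so val.index(key) never raises
    | some j =>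
      (ba.1 ++ (PySem.List.slice val none (some (j : Int))).filter (fun x => !(ba.1.contains x)),
       ba.2 ++ (PySem.List.slice val (some ((j : Int) + 1)) none).filter (fun x => !(ba.2.contains x)))
  else ba

def entryOf (traces : List (List String)) (key : String) : List (String × List String) :=
  let ba := traces.foldl (stepK key) ([], [])
  [("before", ba.1), ("after", ba.2)]

def positional_dict_alt (logs : List (String × List String)) : List (String × List (String × List String)) :=
  let traces := logs.map (·.2)
  let order := traces.foldl (fun ord val => val.foldl ordStep ord) []
  let result := order.foldl (fun res key => res.insert key (entryOf traces key)) PySem.Dict.empty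
  result.items

-- ===== PRECONDITION & SPEC =====
def Spec_positional_dict (logs : List (String × List String)) (out : List (String × List (String × List String))) : Prop := out = positional_dict_alt logs
instance (logs : List (String × List String)) (out : List (String × List (String × List String))) : Decidable (Spec_positional_dict logs out) := by unfold Spec_positional_dict; infer_instance

-- ===== CLAIM (what is proved, stated in full; the proofs are below) =====
def Claim_equal_positional_dict : Prop := ∀ (logs : List (String × List String)), Dom_positional_dict logs → Spec_positional_dict logs (positional_dict logs)

-- ===== LEMMAS AND PROOFS =====

-- the new distinct keys a trace contributes, given the keys already seen
def newKeys : List String → List String → List String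
  | _, [] => []
  | s, x :: xs => if s.contains x then newKeys s xs else x :: newKeys (s ++ [x]) xs

def newKeysL : List String → List (List String) → List String
  | _, [] => []
  | s, v :: ts => newKeys s v ++ newKeysL (s ++ newKeys s v) ts

lemma ordFold_eq (val : List String) : ∀ s, val.foldl ordStep s = s ++ newKeys s val := by
  induction val with
  | nil => intro s; simp [newKeys]
  | cons x xs ih =>
    intro s
    by_cases h : x ∈ s
    · simp [newKeys, List.contains_iff_mem, h, ordStep, ih s]
    · simp only [newKeys, List.contains_iff_mem, h, decide_false, Bool.false_eq_true, if_false,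
        List.foldl_cons, ordStep, ih (s ++ [x]), List.append_assoc, List.singleton_append]

lemma mem_newKeys {y : String} : ∀ (val s : List String), y ∈ newKeys s val → y ∈ val ∧ y ∉ s := by
  intro val
  induction val with
  | nil => intro s h; simp [newKeys] at h
  | cons x xs ih =>
    intro s h
    by_cases hx : x ∈ s
    · simp only [newKeys, List.contains_iff_mem, hx, decide_true, if_true] at h
      obtain ⟨h1, h2⟩ := ih s h
      exact ⟨List.mem_cons_of_mem _ h1, h2⟩
    · simp only [newKeys, List.contains_iff_mem, hx, decide_false, Bool.false_eq_true, if_false,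
        List.mem_cons] at h
      rcases h with h | h
      · exact ⟨by simp [h], h ▸ hx⟩
      · obtain ⟨h1, h2⟩ := ih (s ++ [x]) h
        exact ⟨List.mem_cons_of_mem _ h1, fun hy => h2 (List.mem_append.mpr (Or.inl hy))⟩

lemma mem_append_newKeys {y : String} : ∀ (val s : List String), y ∈ val → y ∈ s ++ newKeys s val := by
  intro val
  induction val with
  | nil => intro s h; cases h
  | cons x xs ih =>
    intro s h
    by_cases hx : x ∈ s
    · simp only [newKeys, List.contains_iff_mem, hx, decide_true, if_true]
      rcases List.mem_cons.mp h with h | h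
      · exact List.mem_append.mpr (Or.inl (h ▸ hx))
      · exact ih s h
    · simp only [newKeys, List.contains_iff_mem, hx, decide_false, Bool.false_eq_true, if_false]
      rcases List.mem_cons.mp h with h | h
      · simp [h]
      · have := ih (s ++ [x]) h
        simp only [List.mem_append, List.mem_singleton, List.mem_cons] at this ⊢
        tauto

lemma nodup_newKeys : ∀ (val s : List String), s.Nodup → (s ++ newKeys s val).Nodup := by
  intro val
  induction val with
  | nil => intro s h; simpa [newKeys]
  | cons x xs ih =>
    intro s h
    by_cases hx : x ∈ s
    · simpa [newKeys, List.contains_iff_mem, hx] using ih s h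
    · simp only [newKeys, List.contains_iff_mem, hx, decide_false, Bool.false_eq_true, if_false]
      have := ih (s ++ [x]) (by
        rw [List.nodup_append]
        exact ⟨h, List.nodup_singleton x, fun a ha b hb => by
          rw [List.mem_singleton.mp hb]; exact fun he => hx (he ▸ ha)⟩)
      simpa [List.append_assoc] using this

lemma newKeys_append : ∀ (p q s : List String),
    newKeys s (p ++ q) = newKeys s p ++ newKeys (s ++ newKeys s p) q := by
  intro p
  induction p with
  | nil => intro q s; simp [newKeys]
  | cons x p ih =>
    intro q s
    by_cases hx : x ∈ s
    · simp [newKeys, List.contains_iff_mem, hx, ih q s]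
    · simp only [List.cons_append, newKeys, List.contains_iff_mem, hx, decide_false,
        Bool.false_eq_true, if_false, ih q (s ++ [x]), List.cons.injEq, true_and,
        List.cons_append]
      congr 2
      simp [List.append_assoc]

lemma ordFoldL_eq : ∀ (ts : List (List String)) (s : List String),
    ts.foldl (fun ord val => val.foldl ordStep ord) s = s ++ newKeysL s ts := by
  intro ts
  induction ts with
  | nil => intro s; simp [newKeysL]
  | cons v ts ih =>
    intro s
    simp only [List.foldl_cons, ordFold_eq v s, newKeysL, ih (s ++ newKeys s v),
      List.append_assoc]

lemma mem_newKeysL {y : String} : ∀ (ts : List (List String)) (s : List String),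
    y ∈ newKeysL s ts → y ∉ s := by
  intro ts
  induction ts with
  | nil => intro s h; simp [newKeysL] at h
  | cons v ts ih =>
    intro s h
    rcases List.mem_append.mp h with h | h
    · exact (mem_newKeys v s h).2
    · intro hy
      exact ih (s ++ newKeys s v) h (List.mem_append.mpr (Or.inl hy))

lemma nodup_newKeysL : ∀ (ts : List (List String)) (s : List String),
    s.Nodup → (s ++ newKeysL s ts).Nodup := by
  intro ts
  induction ts with
  | nil => intro s h; simpa [newKeysL]
  | cons v ts ih =>
    intro s h
    have h1 : (s ++ newKeys s v).Nodup := nodup_newKeys v s h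
    have := ih (s ++ newKeys s v) h1
    simpa [newKeysL, List.append_assoc] using this

lemma stepK_of_not_mem {key : String} {val : List String} (h : key ∉ val)
    (ba : List String × List String) : stepK key ba val = ba := by
  simp [stepK, List.contains_iff_mem, h]

lemma pdStepA_eq_insert_stepK (val : List String) (pos : PySem.Dict String (List String × List String))
    (x : String) (hc : pos.contains x = true) (hx : x ∈ val) :
    pdStepA val pos x = pos.insert x (stepK x (pos.getD x ([], [])) val) := by
  obtain ⟨j, hj⟩ := Option.isSome_iff_exists.mp ((PySem.List.index?_isSome_iff val x).mpr hx)
  simp only [pdStepA, hc, if_true, hj, stepK, List.contains_iff_mem, hx, decide_true]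

lemma pdStepA_not_contains (val : List String) (pos : PySem.Dict String (List String × List String))
    (x : String) (hc : pos.contains x = false) (hx : x ∈ val) :
    pdStepA val pos x = pos.insert x (stepK x ([], []) val) := by
  obtain ⟨j, hj⟩ := Option.isSome_iff_exists.mp ((PySem.List.index?_isSome_iff val x).mpr hx)
  simp only [pdStepA, hc, Bool.false_eq_true, if_false, hj, stepK, List.contains_iff_mem, hx,
    decide_true, if_true, PySem.Dict.getD_insert_self, PySem.Dict.insert_insert_self]

lemma stepK_idem {x : String} {val : List String} (hx : x ∈ val) (w : List String × List String) :
    stepK x (stepK x w val) val = stepK x w val := by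
  obtain ⟨j, hj⟩ := Option.isSome_iff_exists.mp ((PySem.List.index?_isSome_iff val x).mpr hx)
  have hb : ∀ (b pre : List String),
      pre.filter (fun y => !((b ++ pre.filter (fun z => !(b.contains z))).contains y)) = [] := by
    intro b pre
    apply List.filter_eq_nil_iff.mpr
    intro y hy
    have hmem : y ∈ b ++ pre.filter (fun z => !(b.contains z)) := by
      by_cases hyb : y ∈ b
      · exact List.mem_append.mpr (Or.inl hyb)
      · exact List.mem_append.mpr (Or.inr (List.mem_filter.mpr
          ⟨hy, by simp [List.contains_iff_mem, hyb]⟩))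
    have hc2 : (b ++ pre.filter (fun z => !(b.contains z))).contains y = true :=
      List.contains_iff_mem.mpr hmem
    intro hcon
    simp only [hc2, Bool.not_true] at hcon
    exact Bool.false_ne_true hcon
  simp only [stepK, List.contains_iff_mem, hx, decide_true, if_true, hj]
  rw [hb w.1 (PySem.List.slice val none (some (j : Int))),
      hb w.2 (PySem.List.slice val (some ((j : Int) + 1)) none),
      List.append_nil, List.append_nil]

lemma insert_getD_self {ν : Type} (d : PySem.Dict String ν) (k : String) (dflt : ν)
    (hnd : d.keys.Nodup) (hc : d.contains k = true) :
    d.insert k (d.getD k dflt) = d := by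
  apply PySem.Dict.ext
  rw [PySem.Dict.items_insert_of_contains _ _ hc]
  conv_rhs => rw [← List.map_id d.items]
  apply List.map_congr_left
  intro p hp
  by_cases h : p.1 = k
  · simp only [h, beq_self_eq_true, if_pos]
    have hm : (k, p.2) ∈ d.items := by rw [← h]; exact hp
    rw [PySem.Dict.getD_of_mem_items d hm hnd dflt, ← h]; rfl
  · simp [h]

lemma exists_of_mem_keys {ν : Type} (d : PySem.Dict String ν) (x : String)
    (h : x ∈ d.keys) : ∃ w, (x, w) ∈ d.items := by
  simp only [PySem.Dict.keys] at h
  obtain ⟨kv, hkv, he⟩ := List.mem_map.mp h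
  exact ⟨kv.2, by rw [← he]; simpa using hkv⟩

lemma newKeys_singleton_mem {s : List String} {x : String} (h : x ∈ s) : newKeys s [x] = [] := by
  simp [newKeys, List.contains_iff_mem, h]

lemma newKeys_singleton_not_mem {s : List String} {x : String} (h : x ∉ s) :
    newKeys s [x] = [x] := by
  simp [newKeys, List.contains_iff_mem, h]

-- the per-trace invariant carried while folding pdStepA over one trace
lemma traceA_aux (val : List String) : ∀ (rest p : List String)
    (pos d : PySem.Dict String (List String × List String)),
    val = p ++ rest → pos.keys.Nodup →
    d.items = pos.items.map (fun kv => (kv.1, if kv.1 ∈ p then stepK kv.1 kv.2 val else kv.2))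
      ++ (newKeys (pos.keys) p).map (fun k => (k, stepK k ([], []) val)) →
    (rest.foldl (pdStepA val) d).items
      = pos.items.map (fun kv => (kv.1, if kv.1 ∈ p ++ rest then stepK kv.1 kv.2 val else kv.2))
        ++ (newKeys (pos.keys) (p ++ rest)).map (fun k => (k, stepK k ([], []) val)) := by
  intro rest
  induction rest with
  | nil =>
    intro p pos d hval hnd hitems
    simpa using hitems
  | cons x rest' ih =>
    intro p pos d hval hnd hitems
    have hxval : x ∈ val := by rw [hval]; simp
    have hkeys : d.keys = pos.keys ++ newKeys (pos.keys) p := by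
      simp only [PySem.Dict.keys, hitems, List.map_append, List.map_map]
      congr 1
      rw [show ((fun (q : String × (List String × List String)) => q.1) ∘
          (fun k => (k, stepK k ([], []) val))) = id from funext (fun k => rfl), List.map_id]
    have hnd_d : d.keys.Nodup := by rw [hkeys]; exact nodup_newKeys p (pos.keys) hnd
    rw [List.foldl_cons]
    have hstep : (pdStepA val d x).items
        = pos.items.map (fun kv => (kv.1, if kv.1 ∈ p ++ [x] then stepK kv.1 kv.2 val else kv.2))
          ++ (newKeys (pos.keys) (p ++ [x])).map (fun k => (k, stepK k ([], []) val)) := by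
      by_cases hxp : x ∈ p
      · -- A: already processed this trace; pdStepA is a no-op
        have hxs : x ∈ pos.keys ++ newKeys (pos.keys) p := mem_append_newKeys p (pos.keys) hxp
        have hcx : d.contains x = true := by
          rw [PySem.Dict.contains_iff_mem_keys, hkeys]; exact hxs
        obtain ⟨w, hwmem⟩ : ∃ w, (x, (stepK x w val)) ∈ d.items := by
          rcases List.mem_append.mp hxs with hxpos | hxnew
          · obtain ⟨w, hw⟩ := exists_of_mem_keys pos x hxpos
            refine ⟨w, ?_⟩
            rw [hitems]
            refine List.mem_append.mpr (Or.inl ?_)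
            have := List.mem_map_of_mem (l := pos.items)
              (f := fun kv => (kv.1, if kv.1 ∈ p then stepK kv.1 kv.2 val else kv.2)) hw
            simpa [hxp] using this
          · refine ⟨([], []), ?_⟩
            rw [hitems]
            exact List.mem_append.mpr (Or.inr (List.mem_map_of_mem hxnew))
        have hgetD : d.getD x ([], []) = stepK x w val :=
          PySem.Dict.getD_of_mem_items d hwmem hnd_d ([], [])
        have hid : pdStepA val d x = d := by
          rw [pdStepA_eq_insert_stepK val d x hcx hxval, hgetD, stepK_idem hxval w, ← hgetD]
          exact insert_getD_self d x ([], []) hnd_d hcx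
        have hmapeq : pos.items.map
              (fun kv => (kv.1, if kv.1 ∈ p ++ [x] then stepK kv.1 kv.2 val else kv.2))
            = pos.items.map
              (fun kv => (kv.1, if kv.1 ∈ p then stepK kv.1 kv.2 val else kv.2)) := by
          apply List.map_congr_left
          intro kv _
          by_cases hk : kv.1 ∈ p
          · simp [hk, List.mem_append]
          · have hk2 : kv.1 ∉ p ++ [x] := by
              simp only [List.mem_append, List.mem_singleton]
              rintro (h | h)
              · exact hk h
              · exact hk (h ▸ hxp)
            simp [hk, hk2]
        have hnewkeq : newKeys (pos.keys) (p ++ [x]) = newKeys (pos.keys) p := by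
          rw [newKeys_append p [x] (pos.keys), newKeys_singleton_mem hxs, List.append_nil]
        rw [hid, hitems, hmapeq, hnewkeq]
      · by_cases hxpos : x ∈ pos.keys
        · -- B: key from an earlier trace, first occurrence in this trace
          obtain ⟨w, hw⟩ := exists_of_mem_keys pos x hxpos
          have hwd : (x, w) ∈ d.items := by
            rw [hitems]
            refine List.mem_append.mpr (Or.inl ?_)
            have := List.mem_map_of_mem (l := pos.items)
              (f := fun kv => (kv.1, if kv.1 ∈ p then stepK kv.1 kv.2 val else kv.2)) hw
            simpa [hxp] using this
          have hgetD : d.getD x ([], []) = w := PySem.Dict.getD_of_mem_items d hwd hnd_d ([], [])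
          have hcx : d.contains x = true := by
            rw [PySem.Dict.contains_iff_mem_keys, hkeys]
            exact List.mem_append.mpr (Or.inl hxpos)
          rw [pdStepA_eq_insert_stepK val d x hcx hxval, hgetD,
            PySem.Dict.items_insert_of_contains _ _ hcx, hitems, List.map_append,
            List.map_map, List.map_map]
          have hnewkeq : newKeys (pos.keys) (p ++ [x]) = newKeys (pos.keys) p := by
            rw [newKeys_append p [x] (pos.keys),
              newKeys_singleton_mem (List.mem_append.mpr (Or.inl hxpos)), List.append_nil]
          rw [hnewkeq]
          congr 1
          · apply List.map_congr_left
            intro kv hkv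
            by_cases hk1 : kv.1 = x
            · have hkv2 : kv.2 = w := by
                have h1 : pos.getD kv.1 ([], []) = kv.2 :=
                  PySem.Dict.getD_of_mem_items pos (by simpa using hkv) hnd ([], [])
                have h2 : pos.getD x ([], []) = w :=
                  PySem.Dict.getD_of_mem_items pos hw hnd ([], [])
                rw [hk1] at h1; rw [h2] at h1; exact h1.symm
              simp [hk1, hkv2, List.mem_append]
            · have hk2 : (kv.1 ∈ p ++ [x]) ↔ (kv.1 ∈ p) := by
                simp [List.mem_append, hk1]
              simp only [Function.comp_apply, beq_iff_eq, hk1, if_false, hk2]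
          · apply List.map_congr_left
            intro k hk
            have hkx : k ≠ x := by
              intro he
              exact hxp (he ▸ (mem_newKeys p (pos.keys) hk).1)
            simp [hkx]
        · -- C: a brand-new key
          have hxnew : x ∉ newKeys (pos.keys) p := fun h => hxp (mem_newKeys p (pos.keys) h).1
          have hcx : d.contains x = false := by
            cases h : d.contains x
            · rfl
            · have := (PySem.Dict.contains_iff_mem_keys d x).mp h
              rw [hkeys] at this
              rcases List.mem_append.mp this with h1 | h1
              · exact absurd h1 hxpos
              · exact absurd h1 hxnew
          rw [pdStepA_not_contains val d x hcx hxval,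
            PySem.Dict.items_insert_of_not_contains _ _ hcx, hitems]
          have hnewkeq : newKeys (pos.keys) (p ++ [x])
              = newKeys (pos.keys) p ++ [x] := by
            rw [newKeys_append p [x] (pos.keys), newKeys_singleton_not_mem (by
              intro h
              rcases List.mem_append.mp h with h1 | h1
              · exact hxpos h1
              · exact hxnew h1)]
          rw [hnewkeq, List.map_append]
          have hmapeq : pos.items.map
              (fun kv => (kv.1, if kv.1 ∈ p ++ [x] then stepK kv.1 kv.2 val else kv.2))
            = pos.items.map
              (fun kv => (kv.1, if kv.1 ∈ p then stepK kv.1 kv.2 val else kv.2)) := by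
            apply List.map_congr_left
            intro kv hkv
            have hk1 : kv.1 ≠ x := by
              intro he
              exact hxpos (he ▸ PySem.Dict.mem_keys_of_mem_items pos hkv)
            have hk2 : (kv.1 ∈ p ++ [x]) ↔ (kv.1 ∈ p) := by
              simp [List.mem_append, hk1]
            simp only [hk2]
          rw [hmapeq, List.append_assoc]
          rfl
    have := ih (p ++ [x]) pos (pdStepA val d x) (by rw [hval]; simp) hnd hstep
    simpa [List.append_assoc] using this

lemma traceA (val : List String) (pos : PySem.Dict String (List String × List String))
    (hnd : pos.keys.Nodup) :
    (val.foldl (pdStepA val) pos).items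
      = pos.items.map (fun kv => (kv.1, stepK kv.1 kv.2 val))
        ++ (newKeys (pos.keys) val).map (fun k => (k, stepK k ([], []) val)) := by
  have h0 : pos.items
      = pos.items.map (fun kv => (kv.1, if kv.1 ∈ ([] : List String) then stepK kv.1 kv.2 val else kv.2))
        ++ (newKeys (pos.keys) []).map (fun k => (k, stepK k ([], []) val)) := by
    simp [newKeys]
  have h := traceA_aux val val [] pos pos rfl hnd h0
  simp only [List.nil_append] at h
  rw [h]
  congr 1
  apply List.map_congr_left
  intro kv _
  by_cases hk : kv.1 ∈ val
  · simp [hk]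
  · simp [hk, stepK_of_not_mem hk]

lemma mainA : ∀ (ts : List (List String)) (pos : PySem.Dict String (List String × List String)),
    pos.keys.Nodup →
    (ts.foldl (fun pos val => val.foldl (pdStepA val) pos) pos).items
      = pos.items.map (fun kv => (kv.1, ts.foldl (stepK kv.1) kv.2))
        ++ (newKeysL (pos.keys) ts).map (fun k => (k, ts.foldl (stepK k) ([], []))) := by
  intro ts
  induction ts with
  | nil =>
    intro pos _
    simp [newKeysL]
  | cons v ts ih =>
    intro pos hnd
    simp only [List.foldl_cons]
    have h1 := traceA v pos hnd
    have hk1 : (v.foldl (pdStepA v) pos).keys = pos.keys ++ newKeys (pos.keys) v := by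
      simp only [PySem.Dict.keys, h1, List.map_append, List.map_map]
      congr 1
      rw [show ((fun (q : String × (List String × List String)) => q.1) ∘
          (fun k => (k, stepK k ([], []) v))) = id from funext (fun k => rfl), List.map_id]
    have hnd1 : (v.foldl (pdStepA v) pos).keys.Nodup := by
      rw [hk1]; exact nodup_newKeys v (pos.keys) hnd
    have h3 : (newKeysL (pos.keys ++ newKeys (pos.keys) v) ts).map
        (fun k => (k, ts.foldl (stepK k) ([], [])))
      = (newKeysL (pos.keys ++ newKeys (pos.keys) v) ts).map
        (fun k => (k, ts.foldl (stepK k) (stepK k ([], []) v))) := by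
      apply List.map_congr_left
      intro k hk
      have hkv : k ∉ v := fun hin =>
        mem_newKeysL ts _ hk (mem_append_newKeys v (pos.keys) hin)
      rw [stepK_of_not_mem hkv]
    rw [ih (v.foldl (pdStepA v) pos) hnd1, h1, List.map_append, List.map_map, List.map_map,
      hk1, h3]
    show _ = _ ++ (newKeys (pos.keys) v ++ newKeysL (pos.keys ++ newKeys (pos.keys) v) ts).map _
    rw [List.map_append, ← List.append_assoc]
    rfl

-- ===== VERDICT (by name: the statement is the Claim_ definition above) =====
theorem positional_dict_spec : Claim_equal_positional_dict := by
  intro logs _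
  unfold Spec_positional_dict positional_dict positional_dict_alt
  have hfold : logs.foldl (fun pos kv => kv.2.foldl (pdStepA kv.2) pos) PySem.Dict.empty
      = (logs.map (·.2)).foldl (fun pos val => val.foldl (pdStepA val) pos) PySem.Dict.empty := by
    rw [List.foldl_map]
  have hm := mainA (logs.map (·.2)) PySem.Dict.empty PySem.Dict.nodup_keys_empty
  have hord : (logs.map (·.2)).foldl (fun ord val => val.foldl ordStep ord) []
      = newKeysL ([] : List String) (logs.map (·.2)) := by
    rw [ordFoldL_eq]; simp
  have hnodup : (newKeysL ([] : List String) (logs.map (·.2))).Nodup := by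
    simpa using nodup_newKeysL (logs.map (·.2)) [] List.nodup_nil
  have hres : ((newKeysL ([] : List String) (logs.map (·.2))).foldl
      (fun res key => res.insert key (entryOf (logs.map (·.2)) key)) PySem.Dict.empty).items
      = (newKeysL ([] : List String) (logs.map (·.2))).map
        (fun k => (k, entryOf (logs.map (·.2)) k)) := by
    rw [PySem.Dict.items_foldl_insert_fresh _ _ _ _ (fun a _ => PySem.Dict.contains_empty a)
      (by simpa using hnodup)]
    rw [show (PySem.Dict.empty : PySem.Dict String (List (String × List String))).items = []
      from rfl]
    simp
  simp only [hfold, hord, hres]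
  rw [hm, show (PySem.Dict.empty : PySem.Dict String (List String × List String)).items = []
    from rfl, show (PySem.Dict.empty : PySem.Dict String (List String × List String)).keys = []
    from rfl]
  simp only [List.map_nil, List.nil_append, List.map_map]
  apply List.map_congr_left
  intro k _
  rfl
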